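-- pv_equiv track=rewrite | github.com/JihwanRyu051/AI-Programing-HW | HW03_201724461/p3.AlphabeticalOrder/AlphabeticalOrder.py | TripleConsecutive
-- ===== SOURCE A (Python) =====
-- def TripleConsecutive(word):
--     pre = 0
--     index = 0
--     cntlist = [0]
--     for ch in word.lower():
--         if abs(pre - ord(ch)) == 1:
--             cntlist[index] += 1
--         else:
--             index += 1
--             cntlist.append(0)
--         pre = ord(ch)
--     for cnt in cntlist:
--         if cnt >= 2:
--             return True
--     return False
-- ===== SOURCE B (Python) =====
-- def TripleConsecutive(word):
--     s = [0] + [ord(c) for c in word.lower()]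
--     return any(abs(a - b) == 1 and abs(b - c) == 1
--                for a, b, c in zip(s, s[1:], s[2:]))
-- ===== Notes on version B (the rewrite author's own statement) =====
-- stated objective: simpler
-- what changed: Replaces A's run-length accumulator (pre/index/cntlist state plus a second scan for a count >= 2) with a single overlapping-triple window test over the ord sequence prefixed by 0.
import Mathlib
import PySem

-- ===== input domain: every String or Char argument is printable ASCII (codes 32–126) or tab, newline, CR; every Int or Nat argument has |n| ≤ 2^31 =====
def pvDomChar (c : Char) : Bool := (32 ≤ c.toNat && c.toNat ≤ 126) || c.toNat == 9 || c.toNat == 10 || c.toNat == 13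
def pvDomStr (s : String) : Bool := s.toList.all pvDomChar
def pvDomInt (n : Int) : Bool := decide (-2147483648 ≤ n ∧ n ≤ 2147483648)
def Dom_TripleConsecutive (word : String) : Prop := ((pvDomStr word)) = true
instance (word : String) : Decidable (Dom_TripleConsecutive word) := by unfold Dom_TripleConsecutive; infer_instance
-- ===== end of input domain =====

-- B replaces A's run-length accumulator (pre/index/cntlist + second scan) with a single
-- overlapping-triple window test over the 0-prefixed ord sequence: simpler, same O(n) cost.


-- ===== PORT A =====
-- cntlist[index] += 1 : Python in-place increment; exact here because A's index is always
-- 0 ≤ index = len(cntlist) - 1 (it starts at 0 with cntlist = [0] and both grow together).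
def pvIncAt : List Int → Int → List Int
  | [], _ => []
  | x :: xs, i => if i == 0 then (x + 1) :: xs else x :: pvIncAt xs (i - 1)

-- one iteration of A's for-loop over (pre, index, cntlist)
def pvStepA (st : Int × Int × List Int) (ch : Char) : Int × Int × List Int :=
  if (st.1 - (ch.toNat : Int)).natAbs == 1 then
    ((ch.toNat : Int), st.2.1, pvIncAt st.2.2 st.2.1)
  else
    ((ch.toNat : Int), st.2.1 + 1, st.2.2 ++ [0])

def TripleConsecutive (word : String) : Bool :=
  let st := (PySem.Str.lower word).toList.foldl pvStepA ((0 : Int), (0 : Int), [(0 : Int)])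
  -- for cnt in cntlist: if cnt >= 2: return True ; return False
  st.2.2.any (fun cnt => decide ((2 : Int) ≤ cnt))

-- ===== PORT B =====
def TripleConsecutive_alt (word : String) : Bool :=
  let s : List Int := 0 :: (PySem.Str.lower word).toList.map (fun c => (c.toNat : Int))
  -- zip(s, s[1:], s[2:]) ; any(abs(a-b)==1 and abs(b-c)==1)
  (s.zip ((s.drop 1).zip (s.drop 2))).any
    (fun t => ((t.1 - t.2.1).natAbs == 1) && ((t.2.1 - t.2.2).natAbs == 1))

-- ===== PRECONDITION & SPEC =====
def Spec_TripleConsecutive (word : String) (out : Bool) : Prop := out = TripleConsecutive_alt word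
instance (word : String) (out : Bool) : Decidable (Spec_TripleConsecutive word out) := by unfold Spec_TripleConsecutive; infer_instance

-- ===== CLAIM (what is proved, stated in full; the proofs are below) =====
def Claim_equal_TripleConsecutive : Prop := ∀ (word : String), Dom_TripleConsecutive word → Spec_TripleConsecutive word (TripleConsecutive word)

-- ===== LEMMAS AND PROOFS =====

-- abstraction of A's remaining loop: pre = previous ord, cur = count of the current run
def pvAux (pre cur : Int) : List Int → Bool
  | [] => decide ((2 : Int) ≤ cur)
  | c :: rest =>
      if (pre - c).natAbs == 1 then pvAux c (cur + 1) rest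
      else (decide ((2 : Int) ≤ cur) || pvAux c 0 rest)

-- "some three consecutive entries of pre :: l are pairwise ord-adjacent"
def pvHasTriple : Int → List Int → Bool
  | a, b :: c :: rest =>
      (((a - b).natAbs == 1) && ((b - c).natAbs == 1)) || pvHasTriple b (c :: rest)
  | _, _ => false

lemma pvIncAt_append (done : List Int) (cur : Int) :
    pvIncAt (done ++ [cur]) (done.length : Int) = done ++ [cur + 1] := by
  induction done with
  | nil => simp [pvIncAt]
  | cons x xs ih =>
      simp only [List.cons_append, pvIncAt, List.length_cons]
      have h : ((xs.length + 1 : Nat) : Int) ≠ 0 := by positivity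
      simp only [beq_iff_eq]
      rw [if_neg (by exact_mod_cast h)]
      have : ((xs.length + 1 : Nat) : Int) - 1 = (xs.length : Int) := by push_cast; ring
      rw [this, ih]

lemma pvLoopA (chars : List Char) : ∀ (pre : Int) (done : List Int) (cur : Int),
    ((chars.foldl pvStepA (pre, (done.length : Int), done ++ [cur])).2.2.any
        (fun c => decide ((2 : Int) ≤ c)))
      = (done.any (fun c => decide ((2 : Int) ≤ c))
          || pvAux pre cur (chars.map (fun c => (c.toNat : Int)))) := by
  induction chars with
  | nil => intro pre done cur; simp [pvAux]
  | cons ch rest ih =>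
      intro pre done cur
      simp only [List.foldl_cons, List.map_cons, pvStepA, pvAux]
      by_cases h : (pre - (ch.toNat : Int)).natAbs == 1
      · rw [if_pos h, if_pos h]
        simpa [pvIncAt_append] using ih ((ch.toNat : Int)) done (cur + 1)
      · rw [if_neg h, if_neg h]
        have h2 : (done ++ [cur]).length = done.length + 1 := by simp
        have := ih ((ch.toNat : Int)) (done ++ [cur]) 0
        simp only [h2] at this
        have hcast : ((done.length + 1 : Nat) : Int) = (done.length : Int) + 1 := by push_cast; ring
        rw [hcast] at this
        rw [show (done ++ [cur]) ++ [(0 : Int)] = (done ++ [cur]) ++ [0] from rfl] at this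
        rw [this]
        simp [List.any_append, Bool.or_assoc]

lemma pvAux_two (l : List Int) : ∀ (pre cur : Int), 2 ≤ cur → pvAux pre cur l = true := by
  induction l with
  | nil => intro pre cur h; simpa [pvAux] using h
  | cons c rest ih =>
      intro pre cur h
      simp only [pvAux]
      by_cases hadj : (pre - c).natAbs == 1
      · rw [if_pos hadj]; exact ih c (cur + 1) (by omega)
      · rw [if_neg hadj]; simp [h]

lemma pvAux_hasTriple (l : List Int) :
    (∀ pre : Int, pvAux pre 1 l =
        (match l with
         | [] => false
         | c :: r => (((pre - c).natAbs == 1) || pvHasTriple c r)))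
    ∧ (∀ pre : Int, pvAux pre 0 l = pvHasTriple pre l) := by
  induction l with
  | nil => exact ⟨fun pre => by simp [pvAux], fun pre => by simp [pvAux, pvHasTriple]⟩
  | cons b r ih =>
      refine ⟨fun pre => ?_, fun pre => ?_⟩
      · simp only [pvAux]
        by_cases hadj : (pre - b).natAbs == 1
        · rw [if_pos hadj]
          rw [show (1:Int)+1 = 2 from rfl, pvAux_two r b 2 (by norm_num)]
          simp [hadj]
        · rw [if_neg hadj]
          simp only [hadj, Bool.false_or]
          have := ih.2 b
          simpa using this
      · simp only [pvAux]
        by_cases hadj : (pre - b).natAbs == 1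
        · rw [if_pos hadj]
          rw [show (0:Int)+1 = 1 from rfl, ih.1 b]
          cases r with
          | nil => simp [pvHasTriple]
          | cons c r' =>
              simp only [pvHasTriple, hadj, Bool.true_and]
              cases r' with
              | nil => simp [pvHasTriple]
              | cons d r'' =>
                  simp only [pvHasTriple]
                  cases hbc : ((b - c).natAbs == 1) <;> simp
        · rw [if_neg hadj]
          rw [ih.2 b]
          cases r with
          | nil => simp [pvHasTriple]
          | cons c r' => simp [pvHasTriple, hadj]

lemma pvAlt_hasTriple (l : List Int) : ∀ (a : Int),
    (((a :: l).zip (((a :: l).drop 1).zip ((a :: l).drop 2))).any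
        (fun t => ((t.1 - t.2.1).natAbs == 1) && ((t.2.1 - t.2.2).natAbs == 1)))
      = pvHasTriple a l := by
  induction l with
  | nil => intro a; simp [pvHasTriple]
  | cons b r ih =>
      intro a
      cases r with
      | nil => simp [pvHasTriple]
      | cons c r' =>
          have := ih b
          simp only [List.drop, List.zip_cons_cons, List.any_cons, pvHasTriple] at this ⊢
          rw [this]

-- ===== VERDICT (by name: the statement is the Claim_ definition above) =====
theorem TripleConsecutive_spec : Claim_equal_TripleConsecutive := by
  intro word _
  unfold Spec_TripleConsecutive TripleConsecutive TripleConsecutive_alt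
  have hA := pvLoopA (PySem.Str.lower word).toList 0 [] 0
  simp only [List.length_nil, Int.ofNat_zero, List.nil_append, List.any_nil,
    Bool.false_or] at hA
  rw [hA, (pvAux_hasTriple ((PySem.Str.lower word).toList.map (fun c => (c.toNat : Int)))).2 0,
    ← pvAlt_hasTriple]
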